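-- pv_equiv track=rewrite | github.com/Alvaropz/Python_problems_BinarySearch | 1. Easy/beer_bottles/beer_bottles.py | beer_bottles
-- ===== SOURCE A (Python) =====
-- def beer_bottles(n):
--     total = n
--     holding_beers = 0
--     while n > 0:
--         if n % 3 == 0:
--             total += int(n/3)
--             n = int(n/3)
--             n += holding_beers
--             holding_beers = 0
--         else:
--             holding_beers += 1
--             n -= 1
--     return total
-- ===== SOURCE B (Python) =====
-- def beer_bottles(n):
--     # Closed form: drinking n bottles with a 3-empties-for-1 exchange
--     # yields n + (n-1)//2 bottles in total; non-positive n is returned as is.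
--     if n <= 0:
--         return n
--     return n + (n - 1) // 2
-- ===== Notes on version B (the rewrite author's own statement) =====
-- stated objective: simpler
-- what changed: Replaced A's unit-decrement simulation loop (tracking held empties) with the closed form n + (n-1)//2 for positive n (non-positive n returned unchanged).
import Mathlib
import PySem

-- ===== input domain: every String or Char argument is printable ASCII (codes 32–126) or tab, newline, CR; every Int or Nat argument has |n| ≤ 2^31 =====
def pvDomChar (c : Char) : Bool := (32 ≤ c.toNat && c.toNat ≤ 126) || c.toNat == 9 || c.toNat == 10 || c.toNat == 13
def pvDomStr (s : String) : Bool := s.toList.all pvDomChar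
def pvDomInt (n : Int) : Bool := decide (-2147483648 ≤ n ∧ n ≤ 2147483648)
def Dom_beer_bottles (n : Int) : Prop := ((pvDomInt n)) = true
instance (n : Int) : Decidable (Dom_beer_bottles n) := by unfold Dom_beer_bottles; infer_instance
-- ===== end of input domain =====

-- B replaces A's unit-decrement redemption simulation with the closed form n + (n-1)//2 (simpler; no loop).


-- ===== PORT A =====
-- the while-loop of A as structural recursion over the state (n, holding_beers, total);
-- int(n/3) is only evaluated when n > 0 and n % 3 == 0, where it equals floor division n / 3
def beerLoop (n holding total : Int) : Int :=
  if hpos : 0 < n then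
    if n % 3 = 0 then
      beerLoop (n / 3 + holding) 0 (total + n / 3)
    else
      beerLoop (n - 1) (holding + 1) total
  else
    total
termination_by ((n + holding).toNat, n.toNat)
decreasing_by all_goals omega

def beer_bottles (n : Int) : Int := beerLoop n 0 n

-- ===== PORT B =====
def beer_bottles_alt (n : Int) : Int :=
  if n ≤ 0 then n else n + (n - 1) / 2

-- ===== PRECONDITION & SPEC =====
def Spec_beer_bottles (n : Int) (out : Int) : Prop := out = beer_bottles_alt n
instance (n : Int) (out : Int) : Decidable (Spec_beer_bottles n out) := by unfold Spec_beer_bottles; infer_instance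

-- ===== CLAIM (what is proved, stated in full; the proofs are below) =====
def Claim_equal_beer_bottles : Prop := ∀ (n : Int), Dom_beer_bottles n → Spec_beer_bottles n (beer_bottles n)

-- ===== LEMMAS AND PROOFS =====

theorem beerLoop_div3 (n holding total : Int) (h1 : 0 < n) (h2 : n % 3 = 0) :
    beerLoop n holding total = beerLoop (n / 3 + holding) 0 (total + n / 3) := by
  rw [beerLoop]; simp [h1, h2]

theorem beerLoop_dec (n holding total : Int) (h1 : 0 < n) (h2 : n % 3 ≠ 0) :
    beerLoop n holding total = beerLoop (n - 1) (holding + 1) total := by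
  rw [beerLoop]; simp [h1, h2]

theorem beerLoop_done (n holding total : Int) (h : ¬ 0 < n) :
    beerLoop n holding total = total := by
  rw [beerLoop]; simp [h]

-- closed form of the loop from a zero-holding state
theorem beerLoop_closed (k : Nat) : ∀ (n t : Int), n.toNat ≤ k → 0 < n →
    beerLoop n 0 t = t + (n - 1) / 2 := by
  induction k with
  | zero => intro n t hk hn; omega
  | succ k ih =>
    intro n t hk hn
    by_cases h0 : n % 3 = 0
    · -- n = 3m : exchange step, then recurse on n/3
      rw [beerLoop_div3 n 0 t hn h0, ih (n / 3 + 0) (t + n / 3) (by omega) (by omega)]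
      omega
    · by_cases h1 : n % 3 = 1
      · rw [beerLoop_dec n 0 t hn h0]; simp only [zero_add]
        by_cases hone : n = 1
        · rw [hone]; rw [beerLoop_done _ _ _ (by norm_num)]; norm_num
        · have hpos : 0 < n - 1 := by omega
          rw [beerLoop_div3 (n - 1) 1 t hpos (by omega),
              ih ((n - 1) / 3 + 1) (t + (n - 1) / 3) (by omega) (by omega)]
          omega
      · have h2 : n % 3 = 2 := by omega
        rw [beerLoop_dec n 0 t hn h0]; simp only [zero_add]
        by_cases htwo : n = 2
        · rw [htwo]
          rw [beerLoop_dec (2 - 1) 1 t (by norm_num) (by norm_num)]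
          rw [beerLoop_done _ _ _ (by norm_num)]; norm_num
        · rw [beerLoop_dec (n - 1) 1 t (by omega) (by omega)]
          simp only [show n - 1 - 1 = n - 2 from by ring, show (1:Int) + 1 = 2 from by norm_num]
          rw [beerLoop_div3 (n - 2) 2 t (by omega) (by omega),
              ih ((n - 2) / 3 + 2) (t + (n - 2) / 3) (by omega) (by omega)]
          omega

-- ===== VERDICT (by name: the statement is the Claim_ definition above) =====
theorem beer_bottles_spec : Claim_equal_beer_bottles := by
  intro n _
  unfold Spec_beer_bottles beer_bottles beer_bottles_alt
  by_cases hn : 0 < n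
  · rw [beerLoop_closed n.toNat n n le_rfl hn]
    simp [show ¬ n ≤ 0 by omega]
  · rw [beerLoop_done n 0 n hn]
    simp [show n ≤ 0 by omega]
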